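-- pv_equiv track=rewrite | github.com/benreynwar/zamlet | python/fmvpu/control_structures.py | unpack_words_to_fields
-- ===== SOURCE A (Python) =====
-- from typing import List, Tuple, Dict, Any
--
-- def unpack_words_to_fields(words: List[int], field_specs: List[Tuple[str, int]], word_width: int = 32) -> Dict[str, Any]:
--     """Unpack words into field values using field specifications."""
--     # Convert words back to bits
--     bits = []
--     for word in words:
--         for i in range(word_width):
--             bits.append((word >> i) & 1 == 1)
--
--     # Extract fields from bits (reverse order to match packing)
--     field_values = {}
--     bit_offset = 0
--
--     for field_name, bit_width in reversed(field_specs):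
--         value = 0
--         for i in range(bit_width):
--             if bits[bit_offset + i]:
--                 value |= (1 << i)
--         field_values[field_name] = value
--         bit_offset += bit_width
--
--     return field_values
-- ===== SOURCE B (Python) =====
-- def unpack_words_to_fields(words, field_specs, word_width=32):
--     """Unpack words into field values: concatenate the words into one big
--     integer, then extract each field with a shift and a mask."""
--     word_mask = (1 << word_width) - 1
--     big = 0
--     for k, word in enumerate(words):
--         big |= (word & word_mask) << (k * word_width)
--     field_values = {}
--     bit_offset = 0
--     for field_name, bit_width in reversed(field_specs):
--         field_values[field_name] = (big >> bit_offset) & ((1 << bit_width) - 1)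
--         bit_offset += bit_width
--     return field_values
-- ===== Notes on version B (the rewrite author's own statement) =====
-- stated objective: alternative
-- what changed: B builds no per-bit boolean list and has no per-bit inner loops: it ORs the masked words into one big integer and extracts each field with a single shift and mask.
-- outside the precondition, e.g. on unpack_words_to_fields([0], [('a', -1)], 32): A returns {'a': 0}, B raises ValueError; on unpack_words_to_fields([], [], -1): A returns {}, B raises ValueError
import Mathlib
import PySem

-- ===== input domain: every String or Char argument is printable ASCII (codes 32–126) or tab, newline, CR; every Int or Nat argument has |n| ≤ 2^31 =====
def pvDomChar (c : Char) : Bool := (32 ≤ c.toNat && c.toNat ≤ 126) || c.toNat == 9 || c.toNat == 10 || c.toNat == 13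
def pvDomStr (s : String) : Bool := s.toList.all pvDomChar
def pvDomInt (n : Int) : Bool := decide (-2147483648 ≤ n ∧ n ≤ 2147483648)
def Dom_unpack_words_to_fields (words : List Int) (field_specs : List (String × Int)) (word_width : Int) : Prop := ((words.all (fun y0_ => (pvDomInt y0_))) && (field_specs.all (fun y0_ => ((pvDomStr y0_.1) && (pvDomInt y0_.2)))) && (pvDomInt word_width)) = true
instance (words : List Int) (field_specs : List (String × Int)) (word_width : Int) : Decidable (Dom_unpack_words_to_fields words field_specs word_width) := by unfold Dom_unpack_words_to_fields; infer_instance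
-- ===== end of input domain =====

-- B replaces A's per-bit boolean list and per-bit loops by one big integer (the words
-- concatenated) from which each field is extracted with a single shift and mask.

-- ===== PORT A =====
-- literal port of A: build the bit list word by word, then per field OR the selected bits together.
-- Shift amounts are the loop indices of range(word_width)/range(bit_width), hence ≥ 0, so
-- Lean's Int shifts agree with Python's here.
-- `(PySem.List.pyGet? bits j).getD false`: Python raises IndexError exactly where pyGet? is none;
-- those inputs are excluded by Pre_ below.
def unpack_words_to_fields (words : List Int) (field_specs : List (String × Int)) (word_width : Int) : List (String × Int) :=
  let bits : List Bool := words.foldl (fun bs word =>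
    bs ++ (PySem.List.pyRange 0 word_width 1).map
      (fun i => PySem.Int.band (Int.shiftRight word i.toNat) 1 == 1)) []
  let st := field_specs.reverse.foldl (fun (st : PySem.Dict String Int × Int) fs =>
    let value : Int := (PySem.List.pyRange 0 fs.2 1).foldl (fun v i =>
      if (PySem.List.pyGet? bits (st.2 + i)).getD false then PySem.Int.bor v (Int.shiftLeft 1 i.toNat) else v) 0
    (st.1.insert fs.1 value, st.2 + fs.2)) (PySem.Dict.empty, 0)
  st.1.items

-- ===== PORT B =====
-- literal port of B (Source B).  Under Pre_ (word_width ≥ 0 and all widths ≥ 0) every shift amount is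
-- ≥ 0, so Lean's Int shifts agree with Python's (Python raises on negative shift counts).
def unpack_words_to_fields_alt (words : List Int) (field_specs : List (String × Int)) (word_width : Int) : List (String × Int) :=
  let word_mask : Int := Int.shiftLeft 1 word_width.toNat - 1
  let big : Int := (PySem.List.enumerate words).foldl (fun b kw =>
    PySem.Int.bor b (Int.shiftLeft (PySem.Int.band kw.2 word_mask) (kw.1 * word_width).toNat)) 0
  let st := field_specs.reverse.foldl (fun (st : PySem.Dict String Int × Int) fs =>
    (st.1.insert fs.1 (PySem.Int.band (Int.shiftRight big st.2.toNat) (Int.shiftLeft 1 fs.2.toNat - 1)), st.2 + fs.2)) (PySem.Dict.empty, 0)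
  st.1.items

-- ===== PRECONDITION & SPEC =====
-- Pre_ excludes exactly the inputs where Python A raises (IndexError when the widths need more
-- bits than the words provide) plus two corners where A still returns a value but only as an
-- accident of its bit-list representation: a negative word_width together with all-zero field
-- widths (A returns {}), and negative field widths (A yields 0 for them and moves the offset
-- backwards); B's `1 << width` raises ValueError on both, so they lie outside Pre_.
def Pre_unpack_words_to_fields (words : List Int) (field_specs : List (String × Int)) (word_width : Int) : Prop :=
  0 ≤ word_width ∧ (∀ p ∈ field_specs, 0 ≤ p.2) ∧
    (field_specs.map (·.2)).sum ≤ words.length * word_width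

instance (words : List Int) (field_specs : List (String × Int)) (word_width : Int) : Decidable (Pre_unpack_words_to_fields words field_specs word_width) := by unfold Pre_unpack_words_to_fields; infer_instance

def pvWitness_unpack_words_to_fields : List Int × (List (String × Int)) × Int :=
  ([3], [("a", 2), ("b", 2)], 4)

def Spec_unpack_words_to_fields (words : List Int) (field_specs : List (String × Int)) (word_width : Int) (out : List (String × Int)) : Prop := out = unpack_words_to_fields_alt words field_specs word_width
instance (words : List Int) (field_specs : List (String × Int)) (word_width : Int) (out : List (String × Int)) : Decidable (Spec_unpack_words_to_fields words field_specs word_width out) := by unfold Spec_unpack_words_to_fields; infer_instance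

-- ===== CLAIM (what is proved, stated in full; the proofs are below) =====
def Claim_equal_unpack_words_to_fields : Prop := ∀ (words : List Int) (field_specs : List (String × Int)) (word_width : Int), Dom_unpack_words_to_fields words field_specs word_width → Pre_unpack_words_to_fields words field_specs word_width → Spec_unpack_words_to_fields words field_specs word_width (unpack_words_to_fields words field_specs word_width)


-- ===== LEMMAS AND PROOFS =====

-- the bits of one word, as A's bit list produces them
def pvChunk (W : Nat) (w : Int) : List Bool :=
  (List.range W).map (fun k => PySem.Int.band (Int.shiftRight w k) 1 == 1)

-- the low W bits of a word, as a natural number (= Python's `w & ((1 << W) - 1)`)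
def pvMaskN (W : Nat) (w : Int) : Nat := (w % ((2:Int)^W)).toNat

-- the words concatenated into one big natural number, W bits each, first word lowest
def pvBigN (W : Nat) : List Int → Nat
  | [] => 0
  | w :: ws => pvMaskN W w ||| (pvBigN W ws <<< W)

theorem pv_pow_cast (W : Nat) : ((2:Int)^W) = ((2^W : Nat) : Int) := by push_cast; ring

theorem pv_maskN_cast (W : Nat) (w : Int) :
    ((pvMaskN W w : Nat) : Int) = w % ((2:Int)^W) := by
  have h : (0:Int) ≤ w % ((2:Int)^W) := Int.emod_nonneg w (by positivity)
  simp [pvMaskN, Int.toNat_of_nonneg h]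

theorem pv_maskN_lt (W : Nat) (w : Int) : pvMaskN W w < 2^W := by
  have h1 : w % ((2:Int)^W) < ((2:Int)^W) := Int.emod_lt_of_pos w (by positivity)
  have h2 := pv_maskN_cast W w
  have h3 := pv_pow_cast W
  omega

theorem pv_and_mask (n W : Nat) : n &&& (2^W - 1) = n % 2^W := by
  apply Nat.eq_of_testBit_eq; intro i
  simp [Nat.testBit_mod_two_pow]

theorem pv_shl_one (k : Nat) : Int.shiftLeft 1 k = ((2^k : Nat) : Int) := by
  have h : (((1:Nat)) : Int) <<< k = (((1 <<< k : Nat) : Nat) : Int) := (Int.natCast_shiftLeft 1 k).symm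
  simpa [Nat.one_shiftLeft] using h

theorem pv_cast_shiftLeft (m k : Nat) : Int.shiftLeft ((m : Nat) : Int) k = ((m <<< k : Nat) : Int) :=
  (Int.natCast_shiftLeft m k).symm

theorem pv_cast_shiftRight (m k : Nat) : Int.shiftRight ((m : Nat) : Int) k = ((m >>> k : Nat) : Int) :=
  (Int.natCast_shiftRight m k).symm

-- the Int mask (1 << W) - 1 as Lean sees it
theorem pv_shl_mask (W : Nat) : Int.shiftLeft 1 W - 1 = (2:Int)^W - 1 := by
  rw [pv_shl_one, pv_pow_cast]

theorem pv_band_mask (w : Int) (W : Nat) :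
    PySem.Int.band w ((2:Int)^W - 1) = ((pvMaskN W w : Nat) : Int) := by
  have hc := pv_pow_cast W
  have h2 : (1:Nat) ≤ 2^W := Nat.one_le_two_pow
  rw [pv_maskN_cast]
  rcases le_or_gt 0 w with hw | hw
  · rw [PySem.Int.band_of_nonneg hw (by omega)]
    rw [show ((2:Int)^W - 1).toNat = 2^W - 1 by omega]
    rw [pv_and_mask]
    conv_rhs => rw [show w = ((w.toNat : Nat) : Int) from (Int.toNat_of_nonneg hw).symm]
    rw [hc, ← Int.natCast_emod]
  · -- w < 0 : Python's  w & (2^W - 1)  =  (2^W - 1) - ((-w-1) mod 2^W)  =  w mod 2^W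
    have hnn : ¬ (0:Int) ≤ w := by omega
    have hmn : (0:Int) ≤ (2:Int)^W - 1 := by omega
    simp only [PySem.Int.band, if_neg hnn, if_pos hmn]
    rw [show ((2:Int)^W - 1).toNat = 2^W - 1 by omega]
    set t : Nat := (-w - 1).toNat with htdef
    have ht : ((t : Nat) : Int) = -w - 1 := by omega
    rw [Nat.and_comm, pv_and_mask]
    have hdm : 2^W * (t / 2^W) + t % 2^W = t := Nat.div_add_mod t (2^W)
    have hlt : t % 2^W < 2^W := Nat.mod_lt _ (Nat.two_pow_pos W)
    have hr : ((2^W - 1 - t % 2^W : Nat) : Int) = (2:Int)^W - 1 - ((t % 2^W : Nat) : Int) := by omega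
    rw [hr]
    symm
    have hb : (0:Int) ≤ (2:Int)^W - 1 - ((t % 2^W : Nat) : Int) := by omega
    have hb2 : (2:Int)^W - 1 - ((t % 2^W : Nat) : Int) < (2:Int)^W := by omega
    rw [← Int.emod_eq_of_lt hb hb2, Int.emod_eq_emod_iff_emod_sub_eq_zero]
    apply Int.emod_eq_zero_of_dvd
    refine ⟨-(1 + ((t / 2^W : Nat) : Int)), ?_⟩
    have hdm' : (2:Int)^W * ((t / 2^W : Nat) : Int) + ((t % 2^W : Nat) : Int) = ((t : Nat) : Int) := by
      rw [hc]
      exact_mod_cast congrArg (Nat.cast : Nat → Int) hdm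
    linear_combination ht + hdm'

theorem pv_chunk_getD (W : Nat) (w : Int) (j : Nat) :
    (pvChunk W w).getD j false = (pvMaskN W w).testBit j := by
  by_cases hj : j < W
  · have hg : (pvChunk W w).getD j false = (PySem.Int.band (Int.shiftRight w j) 1 == 1) := by
      simp [pvChunk, List.getD_eq_getElem?_getD, hj]
    rw [hg, PySem.Int.band_one, PySem.Int.mod_eq_emod_of_pos (by norm_num),
      show Int.shiftRight w j = w / ((2:Int)^j) from Int.shiftRight_eq_div_pow w j,
      Nat.testBit_eq_decide_div_mod_eq]
    obtain ⟨m, hm⟩ : ∃ m, W - j = m + 1 := ⟨W - j - 1, by omega⟩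
    have hpows' : (2:Int)^(W-j) * (2:Int)^j = (2:Int)^W := by
      rw [← pow_add]
      congr 1
      omega
    set q : Int := w / ((2:Int)^W) with hq
    have hemod : w % ((2:Int)^W) = w + (-((2:Int)^(W-j) * q)) * ((2:Int)^j) := by
      rw [Int.emod_def]
      linear_combination (q : Int) * hpows'
    have hne : ((2:Int)^j) ≠ 0 := by positivity
    have h5 : w / ((2:Int)^j) + -((2:Int)^(W-j) * q)
        = w / ((2:Int)^j) + 2 * (-((2:Int)^m * q)) := by
      rw [hm, pow_succ]
      ring
    have key : ((pvMaskN W w / 2^j % 2 : Nat) : Int) = w / ((2:Int)^j) % 2 := by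
      push_cast
      rw [pv_maskN_cast, hemod, Int.add_mul_ediv_right _ _ hne, h5, Int.add_mul_emod_self_left]
    have key' : (w / ((2:Int)^j) % 2 = 1) ↔ (pvMaskN W w / 2^j % 2 = 1) := by
      constructor
      · intro h1
        have h3 : ((pvMaskN W w / 2^j % 2 : Nat) : Int) = 1 := by rw [key, h1]
        exact_mod_cast h3
      · intro h2
        rw [← key, h2, Nat.cast_one]
    rw [Bool.eq_iff_iff]
    simp only [beq_iff_eq, decide_eq_true_eq]
    exact key'
  · have hlen : (pvChunk W w).length = W := by simp [pvChunk]
    rw [List.getD_eq_getElem?_getD, List.getElem?_eq_none (by omega)]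
    symm
    apply Nat.testBit_lt_two_pow
    exact lt_of_lt_of_le (pv_maskN_lt W w) (Nat.pow_le_pow_right (by norm_num) (by omega))

theorem pv_bits_getD (W : Nat) (ws : List Int) : ∀ (j : Nat),
    (ws.flatMap (pvChunk W)).getD j false = (pvBigN W ws).testBit j := by
  induction ws with
  | nil => intro j; simp [pvBigN]
  | cons w ws ih =>
    intro j
    have hlen : (pvChunk W w).length = W := by simp [pvChunk]
    simp only [List.flatMap_cons, pvBigN]
    by_cases hj : j < W
    · rw [List.getD_append _ _ _ _ (by omega), pv_chunk_getD]
      simp [Nat.testBit_shiftLeft, Nat.not_le.mpr hj]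
    · rw [List.getD_append_right _ _ _ _ (by omega), hlen, ih]
      have hfalse : (pvMaskN W w).testBit j = false := by
        apply Nat.testBit_lt_two_pow
        exact lt_of_lt_of_le (pv_maskN_lt W w) (Nat.pow_le_pow_right (by norm_num) (by omega))
      simp [Nat.testBit_shiftLeft, hfalse, Nat.le_of_not_lt hj]

theorem pv_bitsA (W : Nat) (ws : List Int) :
    ws.foldl (fun bs word =>
      bs ++ (PySem.List.pyRange 0 ((W : Nat) : Int) 1).map
        (fun i => PySem.Int.band (Int.shiftRight word i.toNat) 1 == 1)) []
    = ws.flatMap (pvChunk W) := by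
  rw [PySem.List.foldl_append_eq_flatMap, List.nil_append]
  congr 1
  funext word
  rw [PySem.List.pyRange_zero_natCast, List.map_map]
  simp [pvChunk, Function.comp_def, Int.toNat_natCast]

theorem pv_or_shiftLeft (a b k : Nat) : (a ||| b) <<< k = (a <<< k) ||| (b <<< k) := by
  apply Nat.eq_of_testBit_eq; intro i
  simp [Nat.testBit_shiftLeft, Bool.and_or_distrib_left]

theorem pv_bigFold (W : Nat) (ws : List Int) : ∀ (s accN : Nat),
    (PySem.List.enumerate ws ((s : Nat) : Int)).foldl (fun b kw =>
        PySem.Int.bor b (Int.shiftLeft (PySem.Int.band kw.2 (Int.shiftLeft 1 W - 1)) ((kw.1 * ((W : Nat) : Int)).toNat)))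
        ((accN : Nat) : Int)
      = ((accN ||| (pvBigN W ws <<< (s * W)) : Nat) : Int) := by
  induction ws with
  | nil => intro s accN; simp [PySem.List.enumerate_nil, pvBigN]
  | cons w ws ih =>
    intro s accN
    rw [PySem.List.enumerate_cons]
    simp only [pv_shl_mask] at ih ⊢
    simp only [List.foldl_cons]
    rw [pv_band_mask]
    rw [show ((s : Nat) : Int) * ((W : Nat) : Int) = (((s * W : Nat) : Nat) : Int) by push_cast; ring]
    rw [Int.toNat_natCast, pv_cast_shiftLeft]
    rw [PySem.Int.bor_natCast]
    rw [show ((s : Nat) : Int) + 1 = (((s + 1 : Nat) : Nat) : Int) by push_cast; ring]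
    rw [ih (s + 1) (accN ||| pvMaskN W w <<< (s * W))]
    congr 1
    simp only [pvBigN]
    rw [pv_or_shiftLeft, ← Nat.shiftLeft_add]
    rw [show W + s * W = (s + 1) * W by ring]
    rw [Nat.or_assoc]

theorem pv_R_succ_true (N off w : Nat) (h : N.testBit (off + w) = true) :
    (N >>> off) &&& (2^(w+1) - 1) = ((N >>> off) &&& (2^w - 1)) ||| 2^w := by
  apply Nat.eq_of_testBit_eq; intro i
  simp only [Nat.testBit_and, Nat.testBit_or, Nat.testBit_shiftRight,
    Nat.testBit_two_pow_sub_one, Nat.testBit_two_pow]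
  by_cases hi : i = w
  · subst hi
    rw [h, decide_eq_true (by omega : i < i + 1), decide_eq_false (by omega : ¬ i < i),
      decide_eq_true (rfl : i = i)]
    simp
  · by_cases hi2 : i < w
    · rw [decide_eq_true (by omega : i < w + 1), decide_eq_true hi2,
        decide_eq_false (by omega : ¬ w = i)]
      simp
    · rw [decide_eq_false (by omega : ¬ i < w + 1), decide_eq_false (by omega : ¬ i < w),
        decide_eq_false (by omega : ¬ w = i)]
      simp

theorem pv_R_succ_false (N off w : Nat) (h : N.testBit (off + w) = false) :
    (N >>> off) &&& (2^(w+1) - 1) = (N >>> off) &&& (2^w - 1) := by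
  apply Nat.eq_of_testBit_eq; intro i
  simp only [Nat.testBit_and, Nat.testBit_shiftRight, Nat.testBit_two_pow_sub_one]
  by_cases hi : i = w
  · subst hi
    rw [h, decide_eq_true (by omega : i < i + 1), decide_eq_false (by omega : ¬ i < i)]
    simp
  · by_cases hi2 : i < w
    · rw [decide_eq_true (by omega : i < w + 1), decide_eq_true hi2]
    · rw [decide_eq_false (by omega : ¬ i < w + 1), decide_eq_false (by omega : ¬ i < w)]

theorem pv_valueA (N : Nat) (bits : List Bool)
    (hbits : ∀ j, bits.getD j false = N.testBit j) (off : Nat) : ∀ (w : Nat),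
    (PySem.List.pyRange 0 ((w : Nat) : Int) 1).foldl (fun v i =>
        if (PySem.List.pyGet? bits (((off : Nat) : Int) + i)).getD false
        then PySem.Int.bor v (Int.shiftLeft 1 i.toNat) else v) 0
      = (((N >>> off) &&& (2^w - 1) : Nat) : Int) := by
  intro w
  induction w with
  | zero =>
    rw [PySem.List.pyRange_zero_natCast]
    simp
  | succ w ih =>
    rw [show (((w + 1 : Nat) : Nat) : Int) = ((w : Nat) : Int) + 1 by push_cast; ring]
    rw [PySem.List.pyRange_one_succ_right (by positivity), List.foldl_append, ih]
    simp only [List.foldl_cons, List.foldl_nil]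
    rw [show ((off : Nat) : Int) + ((w : Nat) : Int) = (((off + w : Nat) : Nat) : Int) by push_cast; ring]
    rw [PySem.List.pyGet?_natCast, ← List.getD_eq_getElem?_getD, hbits (off + w)]
    cases h : N.testBit (off + w) with
    | false =>
      rw [if_neg (by simp), pv_R_succ_false N off w h]
    | true =>
      rw [if_pos rfl, pv_R_succ_true N off w h]
      rw [Int.toNat_natCast, pv_shl_one, PySem.Int.bor_natCast]

theorem pv_valueB (N off w : Nat) :
    PySem.Int.band (Int.shiftRight ((N : Nat) : Int) off) (Int.shiftLeft 1 w - 1)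
      = (((N >>> off) &&& (2^w - 1) : Nat) : Int) := by
  rw [pv_shl_mask, pv_cast_shiftRight, pv_band_mask]
  rw [pv_maskN_cast]
  have h : (0:Int) ≤ ((N >>> off : Nat) : Int) := by positivity
  have hlt : ((N >>> off : Nat) : Int) % (2:Int)^w = ((N >>> off) % 2^w : Nat) := by
    rw [pv_pow_cast, ← Int.natCast_emod]
  rw [hlt]
  congr 1
  rw [pv_and_mask]

theorem pv_outer (N : Nat) (bits : List Bool)
    (hbits : ∀ j, bits.getD j false = N.testBit j)
    (specs : List (String × Int)) : ∀ (d : PySem.Dict String Int) (off : Nat),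
    (∀ p ∈ specs, 0 ≤ p.2) →
    specs.foldl (fun (st : PySem.Dict String Int × Int) fs =>
        (st.1.insert fs.1 ((PySem.List.pyRange 0 fs.2 1).foldl (fun v i =>
          if (PySem.List.pyGet? bits (st.2 + i)).getD false then PySem.Int.bor v (Int.shiftLeft 1 i.toNat) else v) 0),
         st.2 + fs.2)) (d, ((off : Nat) : Int))
    = specs.foldl (fun (st : PySem.Dict String Int × Int) fs =>
        (st.1.insert fs.1 (PySem.Int.band (Int.shiftRight (((N : Nat) : Int)) st.2.toNat) (Int.shiftLeft 1 fs.2.toNat - 1)),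
         st.2 + fs.2)) (d, ((off : Nat) : Int)) := by
  induction specs with
  | nil => intro d off h; rfl
  | cons p ps ih =>
    intro d off h
    have hp2 : 0 ≤ p.2 := h p List.mem_cons_self
    have hw : ((p.2.toNat : Nat) : Int) = p.2 := Int.toNat_of_nonneg hp2
    simp only [List.foldl_cons]
    have hval : (PySem.List.pyRange 0 p.2 1).foldl (fun v i =>
        if (PySem.List.pyGet? bits (((off : Nat) : Int) + i)).getD false
        then PySem.Int.bor v (Int.shiftLeft 1 i.toNat) else v) 0
        = (((N >>> off) &&& (2^p.2.toNat - 1) : Nat) : Int) := by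
      rw [← hw]
      exact pv_valueA N bits hbits off p.2.toNat
    have hvalB : PySem.Int.band (Int.shiftRight (((N : Nat) : Int)) (((off : Nat) : Int)).toNat)
        (Int.shiftLeft 1 p.2.toNat - 1)
        = (((N >>> off) &&& (2^p.2.toNat - 1) : Nat) : Int) := by
      rw [Int.toNat_natCast]
      exact pv_valueB N off p.2.toNat
    rw [hval, hvalB]
    rw [show ((off : Nat) : Int) + p.2 = (((off + p.2.toNat : Nat) : Nat) : Int) by omega]
    exact ih (d.insert p.1 (((N >>> off) &&& (2^p.2.toNat - 1) : Nat) : Int)) (off + p.2.toNat)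
      (fun q hq => h q (List.mem_cons_of_mem _ hq))

-- ===== VERDICT (by name: the statement is the Claim_ definition above) =====
theorem unpack_words_to_fields_spec : Claim_equal_unpack_words_to_fields := by
  intro words field_specs word_width hdom hpre
  unfold Spec_unpack_words_to_fields
  obtain ⟨hww, hfs, -⟩ := hpre
  have hW : ((word_width.toNat : Nat) : Int) = word_width := Int.toNat_of_nonneg hww
  set W : Nat := word_width.toNat with hWdef
  simp only [unpack_words_to_fields, unpack_words_to_fields_alt]
  rw [← hW]
  simp only [Int.toNat_natCast]
  rw [pv_bitsA W words]
  have hbig := pv_bigFold W words 0 0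
  simp only [Nat.cast_zero, Nat.zero_mul, Nat.shiftLeft_zero, Nat.zero_or] at hbig
  rw [hbig]
  have houter := pv_outer (pvBigN W words) (words.flatMap (pvChunk W)) (pv_bits_getD W words)
    field_specs.reverse PySem.Dict.empty 0
    (fun q hq => hfs q (List.mem_reverse.mp hq))
  simp only [Nat.cast_zero] at houter
  exact congrArg (fun st => st.1.items) houter
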